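-- pv_equiv track=rewrite | github.com/herbetom/niv-updater | pkgs/niv-updater.py | find_matching_repo_config
-- ===== SOURCE A (Python) =====
-- def find_matching_repo_config(long_url, config_repo):
--     best_match = None
--     longest_match_length = 0
--
--     for _, key in config_repo.items():
--         if key["url"] in long_url:
--             match_length = len(key["url"])
--             if match_length > longest_match_length:
--                 longest_match_length = match_length
--                 best_match = key
--
--     return best_match
-- ===== SOURCE B (Python) =====
-- def find_matching_repo_config(long_url, config_repo):
--     # Two-pass: collect the matching configs once, then pick the first one of
--     # maximal url length.  An empty url is skipped: it is a substring of every
--     # long_url but A's positive-length running maximum never selects it either.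
--     matches = [key for key in config_repo.values()
--                if key["url"] and key["url"] in long_url]
--     if not matches:
--         return None
--     best = max(len(key["url"]) for key in matches)
--     return next(key for key in matches if len(key["url"]) == best)
-- ===== Notes on version B (the rewrite author's own statement) =====
-- stated objective: alternative
-- what changed: A's single scan with a running maximum and best-so-far state is replaced by a two-pass pipeline: filter the matching configs once, compute the maximal url length, and return the first match of that length.
import Mathlib
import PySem

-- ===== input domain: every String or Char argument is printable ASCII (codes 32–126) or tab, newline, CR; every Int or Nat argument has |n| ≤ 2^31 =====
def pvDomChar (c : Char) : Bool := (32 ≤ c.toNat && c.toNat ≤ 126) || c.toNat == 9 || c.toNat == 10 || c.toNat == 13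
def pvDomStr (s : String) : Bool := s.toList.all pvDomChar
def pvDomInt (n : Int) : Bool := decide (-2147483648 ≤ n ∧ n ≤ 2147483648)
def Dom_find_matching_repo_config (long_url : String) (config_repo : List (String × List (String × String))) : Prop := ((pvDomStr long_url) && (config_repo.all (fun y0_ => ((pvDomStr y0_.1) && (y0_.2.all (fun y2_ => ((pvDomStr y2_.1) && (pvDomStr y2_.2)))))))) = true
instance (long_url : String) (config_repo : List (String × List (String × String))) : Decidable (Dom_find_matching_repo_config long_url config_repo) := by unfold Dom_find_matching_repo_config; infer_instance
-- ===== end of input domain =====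

-- B replaces A's single scan with a running maximum by a two-pass pipeline: filter
-- the matching configs once, take the maximal url length, return the first match of
-- that length (objective: alternative decomposition, same linear number of scans).
-- Dicts are normalised with PySem.Dict.ofList (Python builds real dicts from these
-- pair lists: duplicate keys collapse onto the first position, last value wins).

-- shared plumbing: the dict a pair list denotes — its items, its "url" entry
def pvNorm (v : List (String × String)) : List (String × String) :=
  (PySem.Dict.ofList v).items

def pvUrl (v : List (String × String)) : String :=
  (PySem.Dict.ofList v).getD "url" ""

-- ===== PORT A =====
-- loop body of A (key["url"] read as getD: under Pre_ the "url" key is present)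
def pvStepA (long_url : String) (st : Option (List (String × String)) × Int)
    (v : List (String × String)) : Option (List (String × String)) × Int :=
  if PySem.Str.isIn (pvUrl v) long_url then
    if PySem.Str.len (pvUrl v) > st.2 then (some (pvNorm v), PySem.Str.len (pvUrl v)) else st
  else st

def find_matching_repo_config (long_url : String) (config_repo : List (String × List (String × String))) : Option (List (String × String)) :=
  (((PySem.Dict.ofList config_repo).items).foldl
    (fun st kv => pvStepA long_url st kv.2)
    ((none : Option (List (String × String))), (0 : Int))).1

-- ===== PORT B =====
def find_matching_repo_config_alt (long_url : String) (config_repo : List (String × List (String × String))) : Option (List (String × String)) :=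
  let ms := ((PySem.Dict.ofList config_repo).values).filter
    (fun v => !(pvUrl v == "") && PySem.Str.isIn (pvUrl v) long_url)
  if ms.isEmpty then none
  else
    let best := (PySem.List.max? (ms.map (fun v => PySem.Str.len (pvUrl v))) (fun x => x)).getD 0
    (ms.find? (fun v => PySem.Str.len (pvUrl v) == best)).map pvNorm

-- ===== PRECONDITION & SPEC =====
-- Pre_ excludes exactly the inputs on which Python A raises KeyError: a config
-- value whose dict (the one Python builds from the pair list) has no "url" key.
def Pre_find_matching_repo_config (long_url : String) (config_repo : List (String × List (String × String))) : Prop :=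
  ∀ kv ∈ (PySem.Dict.ofList config_repo).items, (PySem.Dict.ofList kv.2).contains "url" = true
instance (long_url : String) (config_repo : List (String × List (String × String))) : Decidable (Pre_find_matching_repo_config long_url config_repo) := by unfold Pre_find_matching_repo_config; infer_instance

def pvWitness_find_matching_repo_config : String × (List (String × List (String × String))) :=
  ("https://github.com/a/b", [("niv", [("url", "github.com/a")]), ("other", [("url", "gitlab.com/x")])])

def Spec_find_matching_repo_config (long_url : String) (config_repo : List (String × List (String × String))) (out : Option (List (String × String))) : Prop := out = find_matching_repo_config_alt long_url config_repo
instance (long_url : String) (config_repo : List (String × List (String × String))) (out : Option (List (String × String))) : Decidable (Spec_find_matching_repo_config long_url config_repo out) := by unfold Spec_find_matching_repo_config; infer_instance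

-- ===== CLAIM (what is proved, stated in full; the proofs are below) =====
def Claim_equal_find_matching_repo_config : Prop := ∀ (long_url : String) (config_repo : List (String × List (String × String))), Dom_find_matching_repo_config long_url config_repo → Pre_find_matching_repo_config long_url config_repo → Spec_find_matching_repo_config long_url config_repo (find_matching_repo_config long_url config_repo)

-- ===== LEMMAS AND PROOFS =====

-- the filter predicate of B, named for the proofs
def pvP (long_url : String) (v : List (String × String)) : Bool :=
  !(pvUrl v == "") && PySem.Str.isIn (pvUrl v) long_url

-- the running maximum A maintains, over the configs B keeps
def pvMx (long_url : String) (vs : List (List (String × String))) (L : Int) : Int :=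
  (vs.filter (pvP long_url)).foldl (fun a v => max a (PySem.Str.len (pvUrl v))) L

lemma pvSeed_le_mx (long_url : String) (vs : List (List (String × String))) (L : Int) :
    L ≤ pvMx long_url vs L := by
  have h := (PySem.List.le_foldl_max ((vs.filter (pvP long_url)).map
    (fun v => PySem.Str.len (pvUrl v))) L).1
  rwa [List.foldl_map] at h

lemma pvLen_pos (v : List (String × String)) (h : pvUrl v ≠ "") :
    1 ≤ PySem.Str.len (pvUrl v) := by
  have h' : (pvUrl v).toList ≠ [] := fun hnil => h (String.toList_eq_nil_iff.mp hnil)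
  have hp := List.length_pos_iff.mpr h'
  rw [PySem.Str.len_eq]
  omega

-- A's loop characterised: final best = first kept config of maximal url length
-- (when that maximum beats the seed), final longest = that maximum.
lemma pvFold_spec (long_url : String) (vs : List (List (String × String)))
    (b : Option (List (String × String))) (L : Int) (hL : 0 ≤ L) :
    vs.foldl (pvStepA long_url) (b, L) =
      ((if L < pvMx long_url vs L
        then ((vs.filter (pvP long_url)).find?
          (fun v => PySem.Str.len (pvUrl v) == pvMx long_url vs L)).map pvNorm
        else b), pvMx long_url vs L) := by
  induction vs generalizing b L with
  | nil => simp [pvMx]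
  | cons v vs ih =>
    by_cases hin : PySem.Str.isIn (pvUrl v) long_url = true
    · by_cases hne : pvUrl v = ""
      · -- matching but empty url: A's strict "> 0" skips it, B's filter drops it
        have hlen : PySem.Str.len (pvUrl v) = 0 := by rw [hne]; decide
        have hstep : pvStepA long_url (b, L) v = (b, L) := by
          show (if PySem.Str.isIn (pvUrl v) long_url = true then
                  if PySem.Str.len (pvUrl v) > L then (some (pvNorm v), PySem.Str.len (pvUrl v))
                  else (b, L)
                else (b, L)) = (b, L)
          rw [if_pos hin, if_neg (by omega)]
        have hp : pvP long_url v = false := by simp [pvP, hne]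
        have hfil : (v :: vs).filter (pvP long_url) = vs.filter (pvP long_url) :=
          List.filter_cons_of_neg (by simp [hp])
        have hmx : pvMx long_url (v :: vs) L = pvMx long_url vs L := by
          unfold pvMx; rw [hfil]
        rw [List.foldl_cons, hstep, hmx, hfil]
        exact ih b L hL
      · -- kept by the filter
        have hp : pvP long_url v = true := by unfold pvP; rw [hin]; simp [hne]
        have hfil : (v :: vs).filter (pvP long_url) = v :: vs.filter (pvP long_url) :=
          List.filter_cons_of_pos hp
        have hmx : pvMx long_url (v :: vs) L
            = pvMx long_url vs (max L (PySem.Str.len (pvUrl v))) := by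
          unfold pvMx; rw [hfil, List.foldl_cons]
        by_cases hgt : L < PySem.Str.len (pvUrl v)
        · have hstep : pvStepA long_url (b, L) v
              = (some (pvNorm v), PySem.Str.len (pvUrl v)) := by
            show (if PySem.Str.isIn (pvUrl v) long_url = true then
                    if PySem.Str.len (pvUrl v) > L then (some (pvNorm v), PySem.Str.len (pvUrl v))
                    else (b, L)
                  else (b, L)) = (some (pvNorm v), PySem.Str.len (pvUrl v))
            rw [if_pos hin, if_pos (by omega)]
          have hseed := pvSeed_le_mx long_url vs (PySem.Str.len (pvUrl v))
          rw [List.foldl_cons, hstep, ih (some (pvNorm v)) (PySem.Str.len (pvUrl v)) (by omega),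
            hmx, max_eq_right hgt.le, hfil]
          by_cases hlt : PySem.Str.len (pvUrl v)
              < pvMx long_url vs (PySem.Str.len (pvUrl v))
          · rw [if_pos hlt, if_pos (by omega),
              List.find?_cons_of_neg (by simp only [beq_iff_eq]; omega)]
          · have heq : pvMx long_url vs (PySem.Str.len (pvUrl v)) = PySem.Str.len (pvUrl v) :=
              le_antisymm (not_lt.mp hlt) hseed
            rw [if_neg hlt, if_pos (by omega),
              List.find?_cons_of_pos (by simp only [beq_iff_eq]; exact heq.symm),
              Option.map_some]
        · have hstep : pvStepA long_url (b, L) v = (b, L) := by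
            show (if PySem.Str.isIn (pvUrl v) long_url = true then
                    if PySem.Str.len (pvUrl v) > L then (some (pvNorm v), PySem.Str.len (pvUrl v))
                    else (b, L)
                  else (b, L)) = (b, L)
            rw [if_pos hin, if_neg (by omega)]
          rw [List.foldl_cons, hstep, ih b L hL, hmx,
            max_eq_left (not_lt.mp hgt), hfil]
          by_cases hlt : L < pvMx long_url vs L
          · rw [if_pos hlt, if_pos hlt,
              List.find?_cons_of_neg (by simp only [beq_iff_eq]; omega)]
          · rw [if_neg hlt, if_neg hlt]
    · -- not a substring of long_url: both sides ignore v
      have hstep : pvStepA long_url (b, L) v = (b, L) := by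
        show (if PySem.Str.isIn (pvUrl v) long_url = true then
                if PySem.Str.len (pvUrl v) > L then (some (pvNorm v), PySem.Str.len (pvUrl v))
                else (b, L)
              else (b, L)) = (b, L)
        rw [if_neg hin]
      have hinf : PySem.Str.isIn (pvUrl v) long_url = false := by
        cases h : PySem.Str.isIn (pvUrl v) long_url
        · rfl
        · exact absurd h hin
      have hp : pvP long_url v = false := by unfold pvP; rw [hinf, Bool.and_false]
      have hfil : (v :: vs).filter (pvP long_url) = vs.filter (pvP long_url) :=
        List.filter_cons_of_neg (by simp [hp])
      have hmx : pvMx long_url (v :: vs) L = pvMx long_url vs L := by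
        unfold pvMx; rw [hfil]
      rw [List.foldl_cons, hstep, hmx, hfil]
      exact ih b L hL

-- both ports on the same list of config values agree
lemma pvMain (long_url : String) (vs : List (List (String × String))) :
    (vs.foldl (pvStepA long_url)
      ((none : Option (List (String × String))), (0 : Int))).1 =
      (if (vs.filter (pvP long_url)).isEmpty then none
       else ((vs.filter (pvP long_url)).find?
          (fun v => PySem.Str.len (pvUrl v) ==
            (PySem.List.max? ((vs.filter (pvP long_url)).map
              (fun v => PySem.Str.len (pvUrl v))) (fun x => x)).getD 0)).map pvNorm) := by
  rw [pvFold_spec long_url vs none 0 le_rfl]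
  show (if (0 : Int) < pvMx long_url vs 0
        then ((vs.filter (pvP long_url)).find?
          (fun v => PySem.Str.len (pvUrl v) == pvMx long_url vs 0)).map pvNorm
        else none) = _
  cases hms : vs.filter (pvP long_url) with
  | nil =>
    have h0 : pvMx long_url vs 0 = 0 := by unfold pvMx; rw [hms]; rfl
    rw [h0]
    simp
  | cons m t =>
    have hpm : pvP long_url m = true := by
      have hm_mem : m ∈ vs.filter (pvP long_url) := by rw [hms]; simp
      exact (List.mem_filter.mp hm_mem).2
    have hne : pvUrl m ≠ "" := by intro h; simp [pvP, h] at hpm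
    have hm1 := pvLen_pos m hne
    have hfold : pvMx long_url vs 0
        = (t.map (fun v => PySem.Str.len (pvUrl v))).foldl max (PySem.Str.len (pvUrl m)) := by
      unfold pvMx
      rw [hms, List.foldl_cons, max_eq_right (by omega : (0:Int) ≤ PySem.Str.len (pvUrl m)),
        List.foldl_map]
    have hge : PySem.Str.len (pvUrl m) ≤ pvMx long_url vs 0 := by
      rw [hfold]; exact (PySem.List.le_foldl_max _ _).1
    have hbest : (PySem.List.max? ((m :: t).map (fun v => PySem.Str.len (pvUrl v)))
        (fun x => x)).getD 0 = pvMx long_url vs 0 := by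
      rw [List.map_cons, PySem.List.max?_id_cons, Option.getD_some, hfold]
    rw [if_pos (by omega), if_neg (by simp), hbest]

-- ===== VERDICT (by name: the statement is the Claim_ definition above) =====
theorem find_matching_repo_config_spec : Claim_equal_find_matching_repo_config := by
  intro long_url config_repo _hdom _hpre
  unfold Spec_find_matching_repo_config find_matching_repo_config
  rw [show ((PySem.Dict.ofList config_repo).items).foldl
        (fun st kv => pvStepA long_url st kv.2)
        ((none : Option (List (String × String))), (0 : Int))
      = ((PySem.Dict.ofList config_repo).values).foldl (pvStepA long_url)
        ((none : Option (List (String × String))), (0 : Int)) from (List.foldl_map).symm]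
  exact pvMain long_url ((PySem.Dict.ofList config_repo).values)
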